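-- pv_equiv track=rewrite | github.com/alexandraback/datacollection | solutions_5688567749672960_1/Python/rutsky/a.py | count_to_10_in_k
-- ===== SOURCE A (Python) =====
-- def count_to_10_in_k(k):
--     assert k >= 1
--
--     if k == 1:
--         return 10
--
--     res = count_to_10_in_k(k - 1)
--
--     if k % 2 == 0:
--         c = k // 2
--         res1 = 10 ** c
--         res2 = 10 ** c - 1
--     else:
--         c = (k - 1) // 2
--         res1 = 10 ** c
--         res2 = 10 ** (c + 1) - 1
--
--     return res + res1 + res2
-- ===== SOURCE B (Python) =====
-- def count_to_10_in_k(k):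
--     assert k >= 1
--     m, r = divmod(k, 2)
--     total = 10 + 13 * (10 ** (m + 1) - 10) // 9 - 2 * m
--     if r == 0:
--         total -= 11 * 10 ** m - 1
--     return total
-- ===== Notes on version B (the rewrite author's own statement) =====
-- stated objective: faster
-- what changed: Replaced the k-deep recursion that accumulates per-step powers with a closed-form geometric-series formula (split on the parity of k) evaluated with a constant number of big-integer power and exact-division operations.
import Mathlib
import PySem

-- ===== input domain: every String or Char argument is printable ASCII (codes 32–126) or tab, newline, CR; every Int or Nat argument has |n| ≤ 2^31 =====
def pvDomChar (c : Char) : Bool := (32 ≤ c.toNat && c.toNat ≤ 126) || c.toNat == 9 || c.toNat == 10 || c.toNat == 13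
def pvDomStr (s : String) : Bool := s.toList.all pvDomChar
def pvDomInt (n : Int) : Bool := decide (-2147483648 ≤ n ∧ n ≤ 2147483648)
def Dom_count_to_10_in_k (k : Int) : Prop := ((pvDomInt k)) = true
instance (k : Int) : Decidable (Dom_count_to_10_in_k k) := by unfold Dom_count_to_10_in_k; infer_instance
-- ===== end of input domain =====

-- B replaces A's k-deep recursion by a closed-form geometric-sum formula (objective: faster, asymptotically).

-- ===== PORT A =====
def count_to_10_in_k (k : Int) : Int :=
  if _h1 : k < 1 then 0          -- 'assert k >= 1' fails here: A raises; excluded by Pre_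
  else if _h2 : k = 1 then 10
  else
    let res := count_to_10_in_k (k - 1)
    if PySem.Int.mod k 2 = 0 then
      let c := PySem.Int.floordiv k 2
      let res1 := 10 ^ c.toNat
      let res2 := 10 ^ c.toNat - 1
      res + res1 + res2
    else
      let c := PySem.Int.floordiv (k - 1) 2
      let res1 := 10 ^ c.toNat
      let res2 := 10 ^ (c.toNat + 1) - 1
      res + res1 + res2
termination_by k.toNat
decreasing_by omega

-- ===== PORT B =====
def count_to_10_in_k_alt (k : Int) : Int :=
  let m := PySem.Int.floordiv k 2
  let r := PySem.Int.mod k 2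
  let total := 10 + PySem.Int.floordiv (13 * (10 ^ (m + 1).toNat - 10)) 9 - 2 * m
  if r = 0 then total - (11 * 10 ^ m.toNat - 1) else total

-- ===== PRECONDITION & SPEC =====
-- Pre_ excludes exactly k < 1, where A's 'assert k >= 1' raises AssertionError.
def Pre_count_to_10_in_k (k : Int) : Prop := 1 ≤ k
instance (k : Int) : Decidable (Pre_count_to_10_in_k k) := by unfold Pre_count_to_10_in_k; infer_instance
def pvWitness_count_to_10_in_k : Int := 5

def Spec_count_to_10_in_k (k : Int) (out : Int) : Prop := out = count_to_10_in_k_alt k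
instance (k : Int) (out : Int) : Decidable (Spec_count_to_10_in_k k out) := by unfold Spec_count_to_10_in_k; infer_instance

-- ===== CLAIM (what is proved, stated in full; the proofs are below) =====
def Claim_equal_count_to_10_in_k : Prop := ∀ (k : Int), Dom_count_to_10_in_k k → Pre_count_to_10_in_k k → Spec_count_to_10_in_k k (count_to_10_in_k k)

-- ===== LEMMAS AND PROOFS =====

-- G m = 10 + 10^2 + … + 10^m  (the geometric sum B's formula computes in closed form)
def pvG : Nat → Int
  | 0 => 0
  | m + 1 => pvG m + 10 ^ (m + 1)

theorem pvG_nine (m : Nat) : 9 * pvG m = 10 ^ (m + 1) - 10 := by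
  induction m with
  | zero => simp [pvG]
  | succ n ih => simp only [pvG]; rw [mul_add, ih]; ring

theorem A_one : count_to_10_in_k 1 = 10 := by
  rw [count_to_10_in_k]; norm_num

theorem A_two : count_to_10_in_k 2 = 29 := by
  rw [count_to_10_in_k]
  norm_num [A_one, PySem.Int.mod, PySem.Int.floordiv]

theorem A_odd_even (m : Nat) :
    count_to_10_in_k (2 * (m : Int) + 1) = 10 + 13 * pvG m - 2 * m ∧
    count_to_10_in_k (2 * (m : Int) + 2) = 10 + 13 * pvG m - 2 * m + (2 * 10 ^ (m + 1) - 1) := by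
  induction m with
  | zero => refine ⟨?_, ?_⟩ <;> norm_num [A_one, A_two, pvG]
  | succ n ih =>
      obtain ⟨ho, he⟩ := ih
      have hodd : count_to_10_in_k (2 * ((n + 1 : Nat) : Int) + 1)
          = 10 + 13 * pvG (n + 1) - 2 * ((n + 1 : Nat) : Int) := by
        rw [count_to_10_in_k]
        have h1 : ¬ ((2 * ((n + 1 : Nat) : Int) + 1) < 1) := by push_cast; omega
        have h2 : ¬ ((2 * ((n + 1 : Nat) : Int) + 1) = 1) := by push_cast; omega
        have harg : 2 * ((n + 1 : Nat) : Int) + 1 - 1 = 2 * (n : Int) + 2 := by push_cast; ring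
        have hm : PySem.Int.mod (2 * ((n + 1 : Nat) : Int) + 1) 2 = 1 := by
          rw [PySem.Int.mod_eq_emod_of_pos (by norm_num)]; push_cast; omega
        have hf : PySem.Int.floordiv (2 * (n : Int) + 2) 2 = ((n + 1 : Nat) : Int) := by
          rw [PySem.Int.floordiv_eq_ediv_of_pos (by norm_num)]; push_cast; omega
        have ht : (((n + 1 : Nat) : Int)).toNat = n + 1 := by omega
        simp only [dif_neg h1, dif_neg h2, harg, hm,
          if_neg (show ¬ ((1:Int) = 0) by norm_num), he, hf, ht]
        simp only [pvG]
        push_cast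
        ring
      refine ⟨hodd, ?_⟩
      rw [count_to_10_in_k]
      have h1 : ¬ ((2 * ((n + 1 : Nat) : Int) + 2) < 1) := by push_cast; omega
      have h2 : ¬ ((2 * ((n + 1 : Nat) : Int) + 2) = 1) := by push_cast; omega
      have hm : PySem.Int.mod (2 * ((n + 1 : Nat) : Int) + 2) 2 = 0 := by
        rw [PySem.Int.mod_eq_emod_of_pos (by norm_num)]; push_cast; omega
      have hf : PySem.Int.floordiv (2 * ((n + 1 : Nat) : Int) + 2) 2 = ((n + 2 : Nat) : Int) := by
        rw [PySem.Int.floordiv_eq_ediv_of_pos (by norm_num)]; push_cast; omega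
      have ht : (((n + 2 : Nat) : Int)).toNat = n + 2 := by omega
      have harg : 2 * ((n + 1 : Nat) : Int) + 2 - 1 = 2 * ((n + 1 : Nat) : Int) + 1 := by ring
      simp only [dif_neg h1, dif_neg h2, hm, harg, hodd, hf, ht]
      simp only [pvG]
      push_cast
      ring

theorem floordiv_13 (m : Nat) :
    PySem.Int.floordiv (13 * (10 ^ (m + 1) - 10)) 9 = 13 * pvG m := by
  have h : (13 : Int) * (10 ^ (m + 1) - 10) = 9 * (13 * pvG m) := by
    rw [show (9:Int) * (13 * pvG m) = 13 * (9 * pvG m) by ring, pvG_nine]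
  rw [h, PySem.Int.floordiv_eq_ediv_of_pos (by norm_num),
    Int.mul_ediv_cancel_left _ (by norm_num)]

theorem B_odd (m : Nat) :
    count_to_10_in_k_alt (2 * (m : Int) + 1) = 10 + 13 * pvG m - 2 * m := by
  have hm : PySem.Int.floordiv (2 * (m : Int) + 1) 2 = (m : Int) := by
    rw [PySem.Int.floordiv_eq_ediv_of_pos (by norm_num)]; omega
  have hr : PySem.Int.mod (2 * (m : Int) + 1) 2 = 1 := by
    rw [PySem.Int.mod_eq_emod_of_pos (by norm_num)]; omega
  have ht : ((m : Int) + 1).toNat = m + 1 := by omega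
  simp only [count_to_10_in_k_alt, hm, hr, ht, if_neg (by norm_num : (1:Int) ≠ 0)]
  rw [floordiv_13]

theorem B_even (m : Nat) :
    count_to_10_in_k_alt (2 * (m : Int) + 2) = 10 + 13 * pvG m - 2 * m + (2 * 10 ^ (m + 1) - 1) := by
  have hm : PySem.Int.floordiv (2 * (m : Int) + 2) 2 = ((m : Int) + 1) := by
    rw [PySem.Int.floordiv_eq_ediv_of_pos (by norm_num)]; omega
  have hr : PySem.Int.mod (2 * (m : Int) + 2) 2 = 0 := by
    rw [PySem.Int.mod_eq_emod_of_pos (by norm_num)]; omega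
  have ht1 : ((m : Int) + 1 + 1).toNat = m + 2 := by omega
  have ht2 : ((m : Int) + 1).toNat = m + 1 := by omega
  simp only [count_to_10_in_k_alt, hm, hr, ht1, ht2, if_true]
  rw [show ((13:Int) * (10 ^ (m + 2) - 10)) = 13 * (10 ^ ((m + 1) + 1) - 10) by norm_num,
    floordiv_13]
  simp only [pvG]
  ring

-- ===== VERDICT (by name: the statement is the Claim_ definition above) =====
theorem count_to_10_in_k_spec : Claim_equal_count_to_10_in_k := by
  intro k _ hpre
  have hk1 : 1 ≤ k := hpre
  unfold Spec_count_to_10_in_k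
  rcases Int.even_or_odd k with ⟨t, ht⟩ | ⟨t, ht⟩
  · -- k = 2t, t ≥ 1; write k = 2*(m)+2 with m = t-1
    have hk : k = 2 * (((t - 1).toNat : Nat) : Int) + 2 := by omega
    rw [hk, (A_odd_even _).2, B_even]
  · have hk : k = 2 * ((t.toNat : Nat) : Int) + 1 := by omega
    rw [hk, (A_odd_even _).1, B_odd]
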